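-- pv_equiv track=rewrite | github.com/UgurKap/cs336-assignment-1 | cs336_basics/bpe_tokenizer_functions.py | merge_pairs
-- ===== SOURCE A (Python) =====
-- def merge_pairs(sequence: tuple[int], old_ids: tuple[int], new_id: int) -> tuple[int]:
--     new_sequence = list(sequence)
--     num_inserts = 0
--     i = 0
--     while i < (len(sequence) - 1):
--         if (sequence[i] == old_ids[0]) and (sequence[i + 1] == old_ids[1]):
--             new_sequence[(i - num_inserts) : (i - num_inserts + 2)] = [new_id]
--             num_inserts += 1
--             i += 1
--         i += 1
--     return tuple(new_sequence)
-- ===== SOURCE B (Python) =====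
-- def merge_pairs(sequence: tuple[int], old_ids: tuple[int], new_id: int) -> tuple[int]:
--     result = []
--     pending = None
--     for elem in sequence:
--         if pending is not None and pending == old_ids[0] and elem == old_ids[1]:
--             result.append(new_id)
--             pending = None
--         else:
--             if pending is not None:
--                 result.append(pending)
--             pending = elem
--     if pending is not None:
--         result.append(pending)
--     return tuple(result)
-- ===== Notes on version B (the rewrite author's own statement) =====
-- stated objective: simpler
-- what changed: B is a single fold over the elements with a one-element 'pending' carry (emit new_id and clear the carry on a match, else flush the carry), with no index arithmetic at all, replacing A's index-driven while loop with in-place slice mutation and num_inserts offset bookkeeping.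
import Mathlib
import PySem

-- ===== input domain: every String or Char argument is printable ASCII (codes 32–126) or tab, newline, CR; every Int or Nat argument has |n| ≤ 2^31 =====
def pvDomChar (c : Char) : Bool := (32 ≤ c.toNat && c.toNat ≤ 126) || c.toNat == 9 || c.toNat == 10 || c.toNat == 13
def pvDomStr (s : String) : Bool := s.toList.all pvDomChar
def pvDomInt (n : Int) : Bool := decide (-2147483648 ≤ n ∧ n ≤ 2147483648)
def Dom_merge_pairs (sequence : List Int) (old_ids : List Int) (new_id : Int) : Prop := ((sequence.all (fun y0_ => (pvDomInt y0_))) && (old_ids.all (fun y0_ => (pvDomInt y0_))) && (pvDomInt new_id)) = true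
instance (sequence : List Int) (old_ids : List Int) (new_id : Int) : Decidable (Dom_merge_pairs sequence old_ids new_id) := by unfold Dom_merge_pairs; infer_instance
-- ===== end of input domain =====

-- B replaces A's index-driven loop with in-place slice mutation and num_inserts offset
-- bookkeeping by a single element-wise fold carrying one pending element (objective: simpler).

-- ===== PORT A =====
-- The while loop of A, as recursion on the loop state (new_sequence, num_inserts, i).
-- sequence[i] / old_ids[j] are ported with pyGetD (default 0): Pre_merge_pairs excludes exactly
-- the inputs on which Python would actually reach an out-of-range access (IndexError); all
-- indices into `sequence` evaluated by the loop are in range.  The slice assignment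
-- new_sequence[(i-num_inserts):(i-num_inserts+2)] = [new_id] is ported by hand as
-- take/drop splicing, exact since 0 ≤ i - num_inserts always holds in A's runs.
def mergeA_loop (sequence old_ids : List Int) (new_id : Int) (ns : List Int) (num_inserts i : Nat) : List Int :=
  if i < sequence.length - 1 then
    if PySem.List.pyGetD sequence (i : Int) 0 = PySem.List.pyGetD old_ids 0 0 ∧
       PySem.List.pyGetD sequence ((i : Int) + 1) 0 = PySem.List.pyGetD old_ids 1 0 then
      mergeA_loop sequence old_ids new_id
        (ns.take (i - num_inserts) ++ new_id :: ns.drop (i - num_inserts + 2)) (num_inserts + 1) (i + 2)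
    else
      mergeA_loop sequence old_ids new_id ns num_inserts (i + 1)
  else ns
termination_by sequence.length - i
decreasing_by all_goals omega

def merge_pairs (sequence : List Int) (old_ids : List Int) (new_id : Int) : List Int :=
  mergeA_loop sequence old_ids new_id sequence 0 0

-- ===== PORT B =====
-- B's for-loop body: one step of the fold over the elements.  State = (result, pending).
def mergeB_step (old_ids : List Int) (new_id : Int) (st : List Int × Option Int) (elem : Int) : List Int × Option Int :=
  match st.2 with
  | some p =>
      if p = PySem.List.pyGetD old_ids 0 0 ∧ elem = PySem.List.pyGetD old_ids 1 0 then
        (st.1 ++ [new_id], none)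
      else
        (st.1 ++ [p], some elem)
  | none => (st.1, some elem)

-- B's final flush of the pending element.
def mergeB_finish (st : List Int × Option Int) : List Int :=
  match st.2 with
  | some p => st.1 ++ [p]
  | none => st.1

def merge_pairs_alt (sequence : List Int) (old_ids : List Int) (new_id : Int) : List Int :=
  mergeB_finish (sequence.foldl (mergeB_step old_ids new_id) ([], none))

-- ===== PRECONDITION & SPEC =====
-- Pre_ excludes exactly the inputs on which Python A (and B alike) raises IndexError on
-- old_ids: the scan runs (length ≥ 2) while old_ids is empty, or old_ids has one element and,
-- by short-circuiting, old_ids[1] is reached because old_ids[0] occurs at a non-final position.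
def Pre_merge_pairs (sequence : List Int) (old_ids : List Int) (new_id : Int) : Prop :=
  sequence.length ≤ 1 ∨ 2 ≤ old_ids.length ∨
    (old_ids.length = 1 ∧ old_ids.getD 0 0 ∉ sequence.dropLast)
instance (sequence : List Int) (old_ids : List Int) (new_id : Int) : Decidable (Pre_merge_pairs sequence old_ids new_id) := by unfold Pre_merge_pairs; infer_instance

def pvWitness_merge_pairs : List Int × List Int × Int := ([1, 2, 3, 2, 3], [2, 3], 9)

def Spec_merge_pairs (sequence : List Int) (old_ids : List Int) (new_id : Int) (out : List Int) : Prop := out = merge_pairs_alt sequence old_ids new_id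
instance (sequence : List Int) (old_ids : List Int) (new_id : Int) (out : List Int) : Decidable (Spec_merge_pairs sequence old_ids new_id out) := by unfold Spec_merge_pairs; infer_instance

-- ===== CLAIM (what is proved, stated in full; the proofs are below) =====
def Claim_equal_merge_pairs : Prop := ∀ (sequence : List Int) (old_ids : List Int) (new_id : Int), Dom_merge_pairs sequence old_ids new_id → Pre_merge_pairs sequence old_ids new_id → Spec_merge_pairs sequence old_ids new_id (merge_pairs sequence old_ids new_id)

-- ===== LEMMAS AND PROOFS =====

-- With no pending element, the fold at position i immediately loads sequence[i] as pending.
lemma mergeB_load (sequence old_ids : List Int) (new_id : Int) (res : List Int) (i : Nat)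
    (hi : i < sequence.length) :
    (sequence.drop i).foldl (mergeB_step old_ids new_id) (res, none) =
    (sequence.drop (i + 1)).foldl (mergeB_step old_ids new_id) (res, some sequence[i]) := by
  rw [List.drop_eq_getElem_cons hi, List.foldl_cons]
  rfl

-- Loop invariant relating A's state to B's fold: with res the already-produced output
-- (covering positions < i, res.length + k = i), A's remaining run from index i equals
-- B's fold over the remaining elements starting with no pending element.
lemma merge_loops_eq (sequence old_ids : List Int) (new_id : Int) :
    ∀ (d i k : Nat) (res : List Int), sequence.length - i ≤ d → res.length + k = i →
      mergeA_loop sequence old_ids new_id (res ++ sequence.drop i) k i =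
      mergeB_finish ((sequence.drop i).foldl (mergeB_step old_ids new_id) (res, none)) := by
  intro d
  induction d with
  | zero =>
    intro i k res hd hlen
    have hle : sequence.length ≤ i := by omega
    rw [mergeA_loop, if_neg (show ¬ i < sequence.length - 1 by omega),
      List.drop_of_length_le hle]
    simp [mergeB_finish]
  | succ d ih =>
    intro i k res hd hlen
    by_cases hi : i < sequence.length
    · rw [mergeB_load sequence old_ids new_id res i hi]
      by_cases hi1 : i + 1 < sequence.length
      · rw [List.drop_eq_getElem_cons hi1, List.foldl_cons]
        have hgi : PySem.List.pyGetD sequence (i : Int) 0 = sequence[i] := by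
          simp [PySem.List.pyGetD_natCast, List.getD_eq_getElem?_getD, List.getElem?_eq_getElem hi]
        have hgi1 : PySem.List.pyGetD sequence ((i : Int) + 1) 0 = sequence[i + 1] := by
          have h2 : ((i : Int) + 1) = ((i + 1 : Nat) : Int) := by push_cast; ring
          rw [h2, PySem.List.pyGetD_natCast]
          simp [List.getD_eq_getElem?_getD, List.getElem?_eq_getElem hi1]
        rw [mergeA_loop, if_pos (show i < sequence.length - 1 by omega)]
        by_cases hc : PySem.List.pyGetD sequence (i : Int) 0 = PySem.List.pyGetD old_ids 0 0 ∧
            PySem.List.pyGetD sequence ((i : Int) + 1) 0 = PySem.List.pyGetD old_ids 1 0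
        · rw [if_pos hc]
          have hstep : mergeB_step old_ids new_id (res, some sequence[i]) sequence[i + 1] =
              (res ++ [new_id], none) := by
            rw [mergeB_step]
            exact if_pos ⟨hgi ▸ hc.1, hgi1 ▸ hc.2⟩
          rw [hstep]
          have hsplice :
              (res ++ sequence.drop i).take (i - k) ++ new_id :: (res ++ sequence.drop i).drop (i - k + 2)
                = (res ++ [new_id]) ++ sequence.drop (i + 2) := by
            have hik : i - k = res.length := by omega
            rw [hik, List.take_left, List.drop_append, List.drop_drop]
            simp
          rw [hsplice]
          exact ih (i + 2) (k + 1) (res ++ [new_id]) (by omega) (by simp; omega)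
        · rw [if_neg hc]
          have hstep : mergeB_step old_ids new_id (res, some sequence[i]) sequence[i + 1] =
              (res ++ [sequence[i]], some sequence[i + 1]) := by
            rw [mergeB_step]
            refine if_neg ?_
            rw [← hgi, ← hgi1]; exact hc
          rw [hstep, ← mergeB_load sequence old_ids new_id (res ++ [sequence[i]]) (i + 1) hi1]
          have hres : res ++ sequence.drop i = (res ++ [sequence[i]]) ++ sequence.drop (i + 1) := by
            rw [List.drop_eq_getElem_cons hi]; simp
          rw [hres]
          exact ih (i + 1) k _ (by omega) (by simp; omega)
      · -- i = sequence.length - 1: A exits leaving the last element; B flushes it as pending.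
        rw [List.drop_of_length_le (show sequence.length ≤ i + 1 by omega), List.foldl_nil]
        rw [mergeA_loop, if_neg (show ¬ i < sequence.length - 1 by omega)]
        rw [List.drop_eq_getElem_cons hi, List.drop_of_length_le (by omega)]
        simp [mergeB_finish]
    · rw [List.drop_of_length_le (by omega), List.foldl_nil,
        mergeA_loop, if_neg (show ¬ i < sequence.length - 1 by omega)]
      simp [mergeB_finish]

-- ===== VERDICT (by name: the statement is the Claim_ definition above) =====
theorem merge_pairs_spec : Claim_equal_merge_pairs := by
  intro sequence old_ids new_id _ _
  unfold Spec_merge_pairs merge_pairs merge_pairs_alt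
  have h := merge_loops_eq sequence old_ids new_id sequence.length 0 0 [] (by omega) (by simp)
  simpa using h
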